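-- pv_equiv track=rewrite | github.com/Muntasir-Arin/bracu-advising-assistant-v1 | program.py | day_calc
-- ===== SOURCE A (Python) =====
-- def day_calc(arr):
--     new_arr = sorted(arr)
--     total = 0
--     for i in range(len(new_arr)-1):
--         f= (new_arr[i+1]-new_arr[i])*2
--         if f ==0:
--             total+= 100000
--             break
--         else:
--             total+= f
--     return total
-- ===== SOURCE B (Python) =====
-- def day_calc(arr):
--     # One O(n) pass instead of sorting: telescoping sum 2*(max-min), or
--     # 2*(smallest duplicated value - min) + 100000 when a duplicate exists.
--     if not arr:
--         return 0
--     mn = min(arr)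
--     seen = set()
--     dup = None
--     for x in arr:
--         if x in seen:
--             if dup is None or x < dup:
--                 dup = x
--         else:
--             seen.add(x)
--     if dup is not None:
--         return 2 * (dup - mn) + 100000
--     return 2 * (max(arr) - mn)
-- ===== Notes on version B (the rewrite author's own statement) =====
-- stated objective: alternative
-- what changed: B replaces sorting plus the adjacent-gap loop by a single hash pass that finds min, max and the smallest duplicated value, using the telescoping identity that the sum of 2*(s[i+1]-s[i]) is 2*(max-min), truncated at the first duplicate, which in sorted order is the smallest duplicated value.
import Mathlib
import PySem

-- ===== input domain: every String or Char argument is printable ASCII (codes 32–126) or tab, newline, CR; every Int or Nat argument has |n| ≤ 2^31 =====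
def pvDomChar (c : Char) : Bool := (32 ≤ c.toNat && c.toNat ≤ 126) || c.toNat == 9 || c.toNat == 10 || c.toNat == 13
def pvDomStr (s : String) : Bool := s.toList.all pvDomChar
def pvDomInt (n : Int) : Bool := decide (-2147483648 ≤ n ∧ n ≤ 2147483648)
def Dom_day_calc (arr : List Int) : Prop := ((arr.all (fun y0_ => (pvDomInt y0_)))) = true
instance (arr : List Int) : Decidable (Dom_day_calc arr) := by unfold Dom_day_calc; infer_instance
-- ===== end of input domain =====

-- B avoids the sort: one hash pass finds min, max and the smallest duplicated
-- value, and a telescoping-sum formula gives A's total; both versions are total.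

-- ===== PORT A =====
-- for i in range(len(new_arr)-1): …  with break; indices are always in range, so getD 0 is exact
def dayGo (s : List Int) (i : Nat) (total : Int) : Int :=
  if _h : i + 1 < s.length then
    let f := (s.getD (i + 1) 0 - s.getD i 0) * 2
    if f = 0 then total + 100000
    else dayGo s (i + 1) (total + f)
  else total
termination_by s.length - i
decreasing_by omega

def day_calc (arr : List Int) : Int :=
  dayGo (PySem.List.sorted arr (fun x => x) false) 0 0

-- ===== PORT B =====
-- dup = x if dup is None or x < dup else dup
def dupUpd (dup : Option Int) (x : Int) : Option Int :=
  match dup with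
  | none => some x
  | some d => if x < d then some x else some d

-- the 'for x in arr' loop maintaining (seen, dup)
def altDup (seen : PySem.Set Int) (dup : Option Int) : List Int → Option Int
  | [] => dup
  | x :: t =>
      if x ∈ seen then altDup seen (dupUpd dup x) t
      else altDup (PySem.Set.add seen x) dup t

def day_calc_alt (arr : List Int) : Int :=
  if arr = [] then 0
  else
    let mn := (PySem.List.min? arr (fun x => x)).getD 0
    match altDup PySem.Set.empty none arr with
    | some d => 2 * (d - mn) + 100000
    | none => 2 * ((PySem.List.max? arr (fun x => x)).getD 0 - mn)

-- ===== PRECONDITION & SPEC =====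
def Spec_day_calc (arr : List Int) (out : Int) : Prop := out = day_calc_alt arr
instance (arr : List Int) (out : Int) : Decidable (Spec_day_calc arr out) := by unfold Spec_day_calc; infer_instance

-- ===== CLAIM (what is proved, stated in full; the proofs are below) =====
def Claim_equal_day_calc : Prop := ∀ (arr : List Int), Dom_day_calc arr → Spec_day_calc arr (day_calc arr)

-- ===== LEMMAS AND PROOFS =====

-- A's loop on the sorted list, written structurally over adjacent pairs
def loop2 : List Int → Int
  | a :: b :: t => if (b - a) * 2 = 0 then (100000 : Int) else (b - a) * 2 + loop2 (b :: t)
  | _ => 0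

lemma dayGo_eq_loop2 (s : List Int) :
    ∀ i total, dayGo s i total = total + loop2 (s.drop i) := by
  have short : ∀ l : List Int, l.length ≤ 1 → loop2 l = 0 := by
    rintro (_ | ⟨a, _ | ⟨b, t⟩⟩) h
    · rfl
    · rfl
    · simp at h
  have key : ∀ n i total, s.length - i ≤ n → dayGo s i total = total + loop2 (s.drop i) := by
    intro n
    induction n with
    | zero =>
        intro i total h
        have hlen : ¬ i + 1 < s.length := by omega
        rw [dayGo, dif_neg hlen, short (s.drop i) (by simp; omega)]
        ring
    | succ n ih =>
        intro i total h
        rw [dayGo]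
        by_cases h1 : i + 1 < s.length
        · rw [dif_pos h1]
          have g0 : s.getD i 0 = s[i]'(by omega) := List.getD_eq_getElem s 0 (by omega)
          have g1 : s.getD (i + 1) 0 = s[i + 1]'h1 := List.getD_eq_getElem s 0 h1
          have hd : s.drop i = s[i]'(by omega) :: s.drop (i + 1) :=
            List.drop_eq_getElem_cons (by omega)
          have hd1 : s.drop (i + 1) = s[i + 1]'h1 :: s.drop (i + 2) :=
            List.drop_eq_getElem_cons h1
          rw [hd, hd1, g0, g1]
          simp only [loop2, ← hd1]
          by_cases hf : (s[i + 1]'h1 - s[i]'(by omega)) * 2 = 0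
          · rw [if_pos hf, if_pos hf]
          · rw [if_neg hf, if_neg hf, ih (i + 1) _ (by omega)]
            ring
        · rw [dif_neg h1, short (s.drop i) (by simp; omega)]
          ring
  exact fun i total => key (s.length - i) i total le_rfl

lemma altDup_stays (t : List Int) : ∀ (S : PySem.Set Int) (d : Int),
    (∀ x ∈ t, d ≤ x) → altDup S (some d) t = some d := by
  induction t with
  | nil => intro S d _; rfl
  | cons x t ih =>
      intro S d h
      have hx : d ≤ x := h x (by simp)
      simp only [altDup]
      split
      · have : dupUpd (some d) x = some d := by simp [dupUpd]; omega
        rw [this]; exact ih S d (fun y hy => h y (by simp [hy]))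
      · exact ih _ d (fun y hy => h y (by simp [hy]))

lemma altDup_congr (t : List Int) : ∀ (S1 S2 : PySem.Set Int) (d : Option Int),
    (∀ x ∈ t, (x ∈ S1 ↔ x ∈ S2)) → altDup S1 d t = altDup S2 d t := by
  induction t with
  | nil => intro _ _ _ _; rfl
  | cons x t ih =>
      intro S1 S2 d h
      have hx : x ∈ S1 ↔ x ∈ S2 := h x (by simp)
      simp only [altDup]
      by_cases h1 : x ∈ S1
      · rw [if_pos h1, if_pos (hx.mp h1)]
        exact ih S1 S2 _ (fun y hy => h y (by simp [hy]))
      · rw [if_neg h1, if_neg (fun h2 => h1 (hx.mpr h2))]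
        refine ih _ _ d (fun y hy => ?_)
        simp only [PySem.Set.mem_add]
        exact or_congr (h y (by simp [hy])) Iff.rfl

lemma dupUpd_comm (d : Option Int) (x y : Int) :
    dupUpd (dupUpd d y) x = dupUpd (dupUpd d x) y := by
  have h : ∀ (e z : Int), dupUpd (some e) z = some (min z e) := by
    intro e z
    simp only [dupUpd]
    split_ifs with hz
    · rw [min_eq_left (le_of_lt hz)]
    · rw [min_eq_right (by omega)]
  rcases d with _ | d
  · show dupUpd (some y) x = dupUpd (some x) y
    rw [h, h]
    congr 1
    omega
  · rw [show dupUpd (some d) y = some (min y d) from h d y,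
        show dupUpd (some d) x = some (min x d) from h d x, h, h]
    congr 1
    omega

lemma altDup_perm {l1 l2 : List Int} (h : l1.Perm l2) :
    ∀ (S1 S2 : PySem.Set Int) (d : Option Int),
    (∀ x, x ∈ S1 ↔ x ∈ S2) → altDup S1 d l1 = altDup S2 d l2 := by
  induction h with
  | nil => intro _ _ _ _; rfl
  | cons x h ih =>
      intro S1 S2 d hS
      simp only [altDup]
      by_cases h1 : x ∈ S1
      · rw [if_pos h1, if_pos ((hS x).mp h1)]; exact ih S1 S2 _ hS
      · rw [if_neg h1, if_neg (fun h2 => h1 ((hS x).mpr h2))]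
        refine ih _ _ d (fun y => ?_)
        simp only [PySem.Set.mem_add]
        exact or_congr (hS y) Iff.rfl
  | swap x y l =>
      intro S1 S2 d hS
      have hcongr : ∀ (T1 T2 : PySem.Set Int) (d' : Option Int), (∀ z, z ∈ T1 ↔ z ∈ T2) →
          altDup T1 d' l = altDup T2 d' l := fun T1 T2 d' h => altDup_congr l T1 T2 d' (fun z _ => h z)
      by_cases hy : y ∈ S1 <;> by_cases hx : x ∈ S1
      · have hx2 : x ∈ S2 := (hS x).mp hx
        have hy2 : y ∈ S2 := (hS y).mp hy
        simp only [altDup, if_pos hy, if_pos hx, if_pos hx2, if_pos hy2]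
        rw [dupUpd_comm]
        exact hcongr S1 S2 _ hS
      · have hx2 : x ∉ S2 := fun h => hx ((hS x).mpr h)
        have hy2 : y ∈ S2 := (hS y).mp hy
        have hy3 : y ∈ PySem.Set.add S2 x := by rw [PySem.Set.mem_add]; exact Or.inl hy2
        simp only [altDup, if_pos hy, if_neg hx, if_neg hx2, if_pos hy3]
        refine hcongr _ _ _ (fun z => ?_)
        simp only [PySem.Set.mem_add]
        exact or_congr (hS z) Iff.rfl
      · have hx2 : x ∈ S2 := (hS x).mp hx
        have hy2 : y ∉ S2 := fun h => hy ((hS y).mpr h)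
        have hx3 : x ∈ PySem.Set.add S1 y := by rw [PySem.Set.mem_add]; exact Or.inl hx
        simp only [altDup, if_neg hy, if_pos hx3, if_pos hx2, if_neg hy2]
        refine hcongr _ _ _ (fun z => ?_)
        simp only [PySem.Set.mem_add]
        exact or_congr (hS z) Iff.rfl
      · have hx2 : x ∉ S2 := fun h => hx ((hS x).mpr h)
        have hy2 : y ∉ S2 := fun h => hy ((hS y).mpr h)
        by_cases hxy : x = y
        · subst hxy
          have h1 : x ∈ PySem.Set.add S1 x := by rw [PySem.Set.mem_add]; exact Or.inr rfl
          have h2 : x ∈ PySem.Set.add S2 x := by rw [PySem.Set.mem_add]; exact Or.inr rfl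
          simp only [altDup, if_neg hy, if_neg hx2, if_pos h1, if_pos h2]
          refine hcongr _ _ _ (fun z => ?_)
          simp only [PySem.Set.mem_add]
          exact or_congr (hS z) Iff.rfl
        · have h1 : x ∉ PySem.Set.add S1 y := by
            rw [PySem.Set.mem_add]; rintro (h | h); exact hx h; exact hxy h
          have h2 : y ∉ PySem.Set.add S2 x := by
            rw [PySem.Set.mem_add]; rintro (h | h); exact hy2 h; exact hxy h.symm
          simp only [altDup, if_neg hy, if_neg h1, if_neg hx2, if_neg h2]
          refine hcongr _ _ _ (fun z => ?_)
          simp only [PySem.Set.mem_add]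
          constructor
          · rintro ((h | h) | h)
            · exact Or.inl (Or.inl ((hS z).mp h))
            · exact Or.inr h
            · exact Or.inl (Or.inr h)
          · rintro ((h | h) | h)
            · exact Or.inl (Or.inl ((hS z).mpr h))
            · exact Or.inr h
            · exact Or.inl (Or.inr h)
  | trans h1 h2 ih1 ih2 =>
      intro S1 S2 d hS
      exact (ih1 S1 S1 d (fun _ => Iff.rfl)).trans (ih2 S1 S2 d hS)

lemma foldl_min_of_le (t : List Int) : ∀ a : Int, (∀ x ∈ t, a ≤ x) → t.foldl min a = a := by
  induction t with
  | nil => intro a _; rfl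
  | cons x t ih =>
      intro a h
      have : min a x = a := min_eq_left (h x (by simp))
      simp only [List.foldl_cons, this]
      exact ih a (fun y hy => h y (by simp [hy]))

lemma min?_id_perm {l1 l2 : List Int} (h : l1.Perm l2) :
    PySem.List.min? l1 (fun x => x) = PySem.List.min? l2 (fun x => x) := by
  rcases e1 : PySem.List.min? l1 (fun x => x) with _ | m1
  · rw [PySem.List.min?_eq_none_iff] at e1
    subst e1
    symm
    rw [PySem.List.min?_eq_none_iff]
    exact h.nil_eq.symm
  · rcases e2 : PySem.List.min? l2 (fun x => x) with _ | m2
    · rw [PySem.List.min?_eq_none_iff] at e2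
      subst e2
      exact absurd (h.mem_iff.mp (PySem.List.min?_mem e1)) (by simp)
    · have h1 : m1 ∈ l2 := h.mem_iff.mp (PySem.List.min?_mem e1)
      have h2 : m2 ∈ l1 := h.mem_iff.mpr (PySem.List.min?_mem e2)
      have le1 : m1 ≤ m2 := PySem.List.min?_isMin e1 m2 h2
      have le2 : m2 ≤ m1 := PySem.List.min?_isMin e2 m1 h1
      rw [le_antisymm le1 le2]

lemma max?_id_perm {l1 l2 : List Int} (h : l1.Perm l2) :
    PySem.List.max? l1 (fun x => x) = PySem.List.max? l2 (fun x => x) := by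
  rcases e1 : PySem.List.max? l1 (fun x => x) with _ | m1
  · rw [PySem.List.max?_eq_none_iff] at e1
    subst e1
    symm
    rw [PySem.List.max?_eq_none_iff]
    exact h.nil_eq.symm
  · rcases e2 : PySem.List.max? l2 (fun x => x) with _ | m2
    · rw [PySem.List.max?_eq_none_iff] at e2
      subst e2
      exact absurd (h.mem_iff.mp (PySem.List.max?_mem e1)) (by simp)
    · have h1 : m1 ∈ l2 := h.mem_iff.mp (PySem.List.max?_mem e1)
      have h2 : m2 ∈ l1 := h.mem_iff.mpr (PySem.List.max?_mem e2)
      have le1 : m2 ≤ m1 := PySem.List.max?_isMax e1 m2 h2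
      have le2 : m1 ≤ m2 := PySem.List.max?_isMax e2 m1 h1
      rw [le_antisymm le2 le1]

lemma loop2_main (t : List Int) : ∀ a : Int, (a :: t).Pairwise (· ≤ ·) →
    loop2 (a :: t) =
      match altDup PySem.Set.empty none (a :: t) with
      | some d => 2 * (d - a) + 100000
      | none => 2 * (t.foldl max a - a) := by
  induction t with
  | nil =>
      intro a _
      have : altDup PySem.Set.empty none [a] = none := rfl
      rw [this]
      simp [loop2]
  | cons b t' ih =>
      intro a hp
      have hab : a ≤ b := (List.pairwise_cons.mp hp).1 b (by simp)
      have hrest : (b :: t').Pairwise (· ≤ ·) := (List.pairwise_cons.mp hp).2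
      have hbt : ∀ x ∈ t', b ≤ x := (List.pairwise_cons.mp hrest).1
      have hnm : a ∉ (PySem.Set.empty : PySem.Set Int) := by simp [PySem.Set.empty]
      have step1 : altDup PySem.Set.empty none (a :: b :: t')
          = altDup (PySem.Set.add PySem.Set.empty a) none (b :: t') := by
        simp only [altDup, if_neg hnm]
      by_cases hxy : b = a
      · subst hxy
        have hmem : b ∈ PySem.Set.add PySem.Set.empty b := by
          rw [PySem.Set.mem_add]; exact Or.inr rfl
        have step2 : altDup (PySem.Set.add PySem.Set.empty b) none (b :: t')
            = altDup (PySem.Set.add PySem.Set.empty b) (some b) t' := by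
          simp only [altDup, if_pos hmem, dupUpd]
        rw [step1, step2, altDup_stays t' _ b hbt]
        simp only [loop2]
        rw [if_pos (by ring)]
        ring_nf
      · have hlt : a < b := lt_of_le_of_ne hab (fun h => hxy h.symm)
        have hax : ∀ x ∈ b :: t', a < x := by
          intro x hx
          rcases List.mem_cons.mp hx with rfl | hx'
          · exact hlt
          · exact lt_of_lt_of_le hlt (hbt x hx')
        have step2 : altDup (PySem.Set.add PySem.Set.empty a) none (b :: t')
            = altDup PySem.Set.empty none (b :: t') := by
          refine altDup_congr (b :: t') _ _ none (fun x hx => ?_)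
          rw [PySem.Set.mem_add]
          have : x ≠ a := ne_of_gt (hax x hx)
          simp [PySem.Set.empty, this]
        have hmax : (b :: t').foldl max a = t'.foldl max b := by
          simp only [List.foldl_cons, max_eq_right hab]
        rw [step1, step2]
        have hf : ¬ (b - a) * 2 = 0 := by omega
        simp only [loop2, if_neg hf]
        rw [ih b hrest]
        rcases e : altDup PySem.Set.empty none (b :: t') with _ | d
        · simp only [hmax]
          ring
        · ring

-- ===== VERDICT (by name: the statement is the Claim_ definition above) =====
theorem day_calc_spec : Claim_equal_day_calc := by
  intro arr _
  unfold Spec_day_calc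
  have hA : day_calc arr = loop2 (PySem.List.sorted arr (fun x => x) false) := by
    rw [day_calc, dayGo_eq_loop2]
    simp
  have hperm : (PySem.List.sorted arr (fun x => x) false).Perm arr :=
    PySem.List.sorted_perm arr (fun x => x) false
  rcases hs : PySem.List.sorted arr (fun x => x) false with _ | ⟨a, t⟩
  · have harr : arr = [] := by
      rw [hs] at hperm
      exact hperm.nil_eq.symm
    rw [hA, hs, harr]
    rfl
  · have hpair : (a :: t).Pairwise (· ≤ ·) := by
      have := PySem.List.sorted_pairwise arr (fun x => x)
      rw [hs] at this
      exact this
    have harr : arr ≠ [] := by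
      intro h
      rw [hs, h] at hperm
      exact absurd hperm.symm.nil_eq (by simp)
    rw [hs] at hperm
    have hmin : PySem.List.min? arr (fun x => x) = some a := by
      rw [← min?_id_perm hperm, PySem.List.min?_id_cons,
          foldl_min_of_le t a (List.pairwise_cons.mp hpair).1]
    have hmax : PySem.List.max? arr (fun x => x) = some (t.foldl max a) := by
      rw [← max?_id_perm hperm, PySem.List.max?_id_cons]
    have hdup : altDup PySem.Set.empty none arr = altDup PySem.Set.empty none (a :: t) :=
      altDup_perm hperm.symm _ _ none (fun _ => Iff.rfl)
    rw [hA, hs, day_calc_alt, if_neg harr, hmin, hmax, hdup, loop2_main t a hpair]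
    rfl
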